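-- pv_equiv track=rewrite | github.com/Ekimerton/classio-legacy | optimizers/optimizer.py | create_calendar
-- ===== SOURCE A (Python) =====
-- def create_calendar(class_list):
--     flat_list = [item for sublist in class_list for item in sublist]
--     day_list = [[], [], [], [], []]
--     day_map = {'Mo': 0, 'Tu': 1, 'We': 2, 'Th': 3, 'Fr': 4}
--     for entry in flat_list:
--         if len(entry) != 10:
--             continue
--         if entry[:2] in ['Mo', 'Tu', 'We', 'Th', 'Fr']:
--             day_list[day_map[entry[:2]]].append(entry[2:])
--     for day in day_list:
--         day.sort()
--     return day_list
-- ===== SOURCE B (Python) =====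
-- def create_calendar(class_list):
--     days = ['Mo', 'Tu', 'We', 'Th', 'Fr']
--     flat = [item for sublist in class_list for item in sublist]
--     valid = sorted(e for e in flat if len(e) == 10 and e[:2] in days)
--     return [[e[2:] for e in valid if e[:2] == d] for d in days]
-- ===== Notes on version B (the rewrite author's own statement) =====
-- stated objective: alternative
-- what changed: Instead of bucketing entries into five day lists during one pass and then sorting each bucket, B sorts the filtered flat list once globally and builds each day's list by filtering the sorted list (the two-char day prefix is constant within a bucket, so the global lexicographic sort already orders each bucket by suffix).
import Mathlib
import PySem

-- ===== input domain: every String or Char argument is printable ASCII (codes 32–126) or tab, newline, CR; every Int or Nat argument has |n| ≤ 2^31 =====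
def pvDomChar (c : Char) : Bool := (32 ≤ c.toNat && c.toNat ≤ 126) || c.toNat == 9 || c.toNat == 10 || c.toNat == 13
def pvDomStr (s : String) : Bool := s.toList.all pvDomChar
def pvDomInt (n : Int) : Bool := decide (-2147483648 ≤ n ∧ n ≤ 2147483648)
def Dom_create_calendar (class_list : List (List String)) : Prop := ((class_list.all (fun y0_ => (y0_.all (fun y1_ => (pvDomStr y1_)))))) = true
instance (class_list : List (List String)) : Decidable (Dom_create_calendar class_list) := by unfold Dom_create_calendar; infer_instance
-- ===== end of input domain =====

-- B replaces A's per-day bucketing-then-five-sorts with one global sort of the filtered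
-- flat list followed by a per-day filter (alternative decomposition, same asymptotic cost).

-- ===== PORT A =====
def create_calendar (class_list : List (List String)) : List (List String) :=
  let flat_list : List String := class_list.flatMap (fun sublist => sublist)
  let day_map : PySem.Dict String Int := PySem.Dict.ofList [("Mo", 0), ("Tu", 1), ("We", 2), ("Th", 3), ("Fr", 4)]
  let day_list : List (List String) := [[], [], [], [], []]
  let day_list := flat_list.foldl (fun dl entry =>
    if PySem.Str.len entry ≠ 10 then dl
    else if ["Mo", "Tu", "We", "Th", "Fr"].contains (PySem.Str.slice entry none (some 2)) then
      let i := (PySem.Dict.getD day_map (PySem.Str.slice entry none (some 2)) 0).toNat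
      dl.set i ((dl.getD i []) ++ [PySem.Str.slice entry (some 2) none])
    else dl) day_list
  day_list.map (fun day => PySem.List.sorted day (fun x => x) false)

-- ===== PORT B =====
def create_calendar_alt (class_list : List (List String)) : List (List String) :=
  let days : List String := ["Mo", "Tu", "We", "Th", "Fr"]
  let flat : List String := class_list.flatMap (fun sublist => sublist)
  let valid : List String := PySem.List.sorted
    (flat.filter (fun e => PySem.Str.len e == 10 && days.contains (PySem.Str.slice e none (some 2))))
    (fun x => x) false
  days.map (fun d => (valid.filter (fun e => PySem.Str.slice e none (some 2) == d)).map
    (fun e => PySem.Str.slice e (some 2) none))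

-- ===== PRECONDITION & SPEC =====
def Spec_create_calendar (class_list : List (List String)) (out : List (List String)) : Prop := out = create_calendar_alt class_list
instance (class_list : List (List String)) (out : List (List String)) : Decidable (Spec_create_calendar class_list out) := by unfold Spec_create_calendar; infer_instance

-- ===== CLAIM (what is proved, stated in full; the proofs are below) =====
def Claim_equal_create_calendar : Prop := ∀ (class_list : List (List String)), Dom_create_calendar class_list → Spec_create_calendar class_list (create_calendar class_list)

-- ===== LEMMAS AND PROOFS =====
-- a ≤ b between strings with the same two leading characters transfers to their suffixes
lemma cons_le_cons_iff_char (c : Char) (s t : List Char) : c :: s ≤ c :: t ↔ s ≤ t := by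
  rw [← not_lt, ← not_lt, List.cons_lt_cons_self]

lemma append_le_append_left_char (u s t : List Char) : u ++ s ≤ u ++ t ↔ s ≤ t := by
  induction u with
  | nil => rfl
  | cons c u ih => simpa [cons_le_cons_iff_char] using ih

lemma le_suffix_of_le (a b : String)
    (h2 : a.toList.take 2 = b.toList.take 2) (h : a ≤ b) :
    PySem.Str.slice a (some 2) none ≤ PySem.Str.slice b (some 2) none := by
  rw [String.le_iff_toList_le] at h ⊢
  have ha : (PySem.Str.slice a (some 2) none).toList = a.toList.drop 2 := by
    simp [PySem.List.slice_from _ (by norm_num : (0:Int) ≤ 2)]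
  have hb : (PySem.Str.slice b (some 2) none).toList = b.toList.drop 2 := by
    simp [PySem.List.slice_from _ (by norm_num : (0:Int) ≤ 2)]
  rw [ha, hb]
  rw [← List.take_append_drop 2 a.toList, ← List.take_append_drop 2 b.toList, h2] at h
  exact (append_le_append_left_char _ _ _).mp h

lemma pref_congr (a b : String)
    (h : PySem.Str.slice a none (some 2) = PySem.Str.slice b none (some 2)) :
    a.toList.take 2 = b.toList.take 2 := by
  have := congrArg String.toList h
  simpa [PySem.List.slice_to _ (by norm_num : (0:Int) ≤ 2)] using this

lemma foldA (xs : List String) (l0 l1 l2 l3 l4 : List String) :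
    xs.foldl (fun dl entry =>
      if PySem.Str.len entry ≠ 10 then dl
      else if ["Mo", "Tu", "We", "Th", "Fr"].contains (PySem.Str.slice entry none (some 2)) then
        dl.set (PySem.Dict.getD (PySem.Dict.ofList [("Mo", (0:Int)), ("Tu", 1), ("We", 2), ("Th", 3), ("Fr", 4)]) (PySem.Str.slice entry none (some 2)) 0).toNat
          ((dl.getD (PySem.Dict.getD (PySem.Dict.ofList [("Mo", (0:Int)), ("Tu", 1), ("We", 2), ("Th", 3), ("Fr", 4)]) (PySem.Str.slice entry none (some 2)) 0).toNat []) ++ [PySem.Str.slice entry (some 2) none])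
      else dl) [l0, l1, l2, l3, l4] =
    [l0 ++ (xs.filter (fun e => PySem.Str.len e == 10 && (PySem.Str.slice e none (some 2) == "Mo"))).map (fun e => PySem.Str.slice e (some 2) none),
     l1 ++ (xs.filter (fun e => PySem.Str.len e == 10 && (PySem.Str.slice e none (some 2) == "Tu"))).map (fun e => PySem.Str.slice e (some 2) none),
     l2 ++ (xs.filter (fun e => PySem.Str.len e == 10 && (PySem.Str.slice e none (some 2) == "We"))).map (fun e => PySem.Str.slice e (some 2) none),
     l3 ++ (xs.filter (fun e => PySem.Str.len e == 10 && (PySem.Str.slice e none (some 2) == "Th"))).map (fun e => PySem.Str.slice e (some 2) none),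
     l4 ++ (xs.filter (fun e => PySem.Str.len e == 10 && (PySem.Str.slice e none (some 2) == "Fr"))).map (fun e => PySem.Str.slice e (some 2) none)] := by
  induction xs generalizing l0 l1 l2 l3 l4 with
  | nil => simp
  | cons e xs ih =>
    rw [List.foldl_cons]
    by_cases hlen : PySem.Str.len e ≠ 10
    · have hl : (e.length : Int) ≠ 10 := by simpa using hlen
      rw [if_pos hlen, ih]
      simp [hl]
    · have hl : (e.length : Int) = 10 := by simpa using not_not.mp hlen
      rw [if_neg hlen]
      by_cases h0 : PySem.Str.slice e none (some 2) = "Mo"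
      · simp only [h0]
        rw [if_pos (by decide)]
        refine (ih _ _ _ _ _).trans ?_
        simp [hl, h0, List.append_assoc]
        rfl
      · by_cases h1 : PySem.Str.slice e none (some 2) = "Tu"
        · simp only [h1]
          rw [if_pos (by decide)]
          refine (ih _ _ _ _ _).trans ?_
          simp [hl, h1, List.append_assoc]
          rfl
        · by_cases h2 : PySem.Str.slice e none (some 2) = "We"
          · simp only [h2]
            rw [if_pos (by decide)]
            refine (ih _ _ _ _ _).trans ?_
            simp [hl, h2, List.append_assoc]
            rfl
          · by_cases h3 : PySem.Str.slice e none (some 2) = "Th"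
            · simp only [h3]
              rw [if_pos (by decide)]
              refine (ih _ _ _ _ _).trans ?_
              simp [hl, h3, List.append_assoc]
              rfl
            · by_cases h4 : PySem.Str.slice e none (some 2) = "Fr"
              · simp only [h4]
                rw [if_pos (by decide)]
                refine (ih _ _ _ _ _).trans ?_
                simp [hl, h4, List.append_assoc]
                rfl
              · rw [if_neg (by simp [h0, h1, h2, h3, h4]), ih]
                simp [hl, h0, h1, h2, h3, h4]

lemma day_eq (flat : List String) (d : String)
    (hd : d ∈ (["Mo", "Tu", "We", "Th", "Fr"] : List String)) :
    PySem.List.sorted ((flat.filter (fun e => PySem.Str.len e == 10 && (PySem.Str.slice e none (some 2) == d))).map (fun e => PySem.Str.slice e (some 2) none)) (fun x => x) false =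
    ((PySem.List.sorted (flat.filter (fun e => PySem.Str.len e == 10 && (["Mo", "Tu", "We", "Th", "Fr"] : List String).contains (PySem.Str.slice e none (some 2)))) (fun x => x) false).filter
      (fun e => PySem.Str.slice e none (some 2) == d)).map (fun e => PySem.Str.slice e (some 2) none) := by
  have hcont : (["Mo", "Tu", "We", "Th", "Fr"] : List String).contains d = true :=
    List.elem_eq_true_of_mem hd
  have hF : ((flat.filter (fun e => PySem.Str.len e == 10 && (["Mo", "Tu", "We", "Th", "Fr"] : List String).contains (PySem.Str.slice e none (some 2)))).filter (fun e => PySem.Str.slice e none (some 2) == d))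
      = flat.filter (fun e => PySem.Str.len e == 10 && (PySem.Str.slice e none (some 2) == d)) := by
    rw [List.filter_filter]
    apply List.filter_congr
    intro e _
    by_cases h : PySem.Str.slice e none (some 2) = d
    · simp [h]
      intro _
      simpa using hd
    · have hb : (PySem.Str.slice e none (some 2) == d) = false := beq_eq_false_iff_ne.mpr h
      simp [hb]
  have hpermR : (((PySem.List.sorted (flat.filter (fun e => PySem.Str.len e == 10 && (["Mo", "Tu", "We", "Th", "Fr"] : List String).contains (PySem.Str.slice e none (some 2)))) (fun x => x) false).filter
      (fun e => PySem.Str.slice e none (some 2) == d))).Perm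
      (flat.filter (fun e => PySem.Str.len e == 10 && (PySem.Str.slice e none (some 2) == d))) := by
    have := (PySem.List.sorted_perm (flat.filter (fun e => PySem.Str.len e == 10 && (["Mo", "Tu", "We", "Th", "Fr"] : List String).contains (PySem.Str.slice e none (some 2)))) (fun x => x) false).filter
      (fun e => PySem.Str.slice e none (some 2) == d)
    rw [hF] at this
    exact this
  have hpairR : List.Pairwise (fun a b : String => a ≤ b)
      ((PySem.List.sorted (flat.filter (fun e => PySem.Str.len e == 10 && (["Mo", "Tu", "We", "Th", "Fr"] : List String).contains (PySem.Str.slice e none (some 2)))) (fun x => x) false).filter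
      (fun e => PySem.Str.slice e none (some 2) == d)) :=
    List.Pairwise.filter _
      (PySem.List.sorted_pairwise (flat.filter (fun e => PySem.Str.len e == 10 && (["Mo", "Tu", "We", "Th", "Fr"] : List String).contains (PySem.Str.slice e none (some 2)))) (fun x => x))
  refine PySem.List.eq_of_perm_of_pairwise_le_of_injective (fun x => x) (fun a b h => h)
    ((PySem.List.sorted_perm _ _ _).trans (hpermR.map _).symm)
    (PySem.List.sorted_pairwise _ _) ?_
  rw [List.pairwise_map]
  refine List.Pairwise.imp_of_mem ?_ hpairR
  intro a b ha hb hab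
  have hpa : PySem.Str.slice a none (some 2) = d := by
    have := List.of_mem_filter ha
    simpa using this
  have hpb : PySem.Str.slice b none (some 2) = d := by
    have := List.of_mem_filter hb
    simpa using this
  exact le_suffix_of_le a b (pref_congr a b (hpa.trans hpb.symm)) hab


-- ===== VERDICT (by name: the statement is the Claim_ definition above) =====
theorem create_calendar_spec : Claim_equal_create_calendar := by
  intro class_list _
  unfold Spec_create_calendar create_calendar create_calendar_alt
  simp only []
  rw [foldA]
  simp only [List.map, List.nil_append]
  rw [day_eq _ "Mo" (by decide), day_eq _ "Tu" (by decide), day_eq _ "We" (by decide),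
      day_eq _ "Th" (by decide), day_eq _ "Fr" (by decide)]
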